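-- pv_equiv track=rewrite | github.com/Suraj1812/Dattamsha | backend/app/services/policy_assistant.py | _sections_with_line_numbers
-- ===== SOURCE A (Python) =====
-- def _sections_with_line_numbers(text: str) -> list[tuple[str, int, int]]:
--     lines = text.splitlines()
--     sections: list[tuple[str, int, int]] = []
--     buffer: list[str] = []
--     start_line = 1
--
--     for index, line in enumerate(lines, start=1):
--         if line.strip().startswith("#") and buffer:
--             sections.append(("\n".join(buffer).strip(), start_line, index - 1))
--             buffer = [line]
--             start_line = index
--             continue
--
--         if not buffer:
--             start_line = index
--         buffer.append(line)
--
--     if buffer: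
--         sections.append(("\n".join(buffer).strip(), start_line, len(lines)))
--
--     return [(body, start, end) for body, start, end in sections if body]
-- ===== SOURCE B (Python) =====
-- def _sections_with_line_numbers(text: str) -> list[tuple[str, int, int]]:
--     lines = text.splitlines()
--     if not lines:
--         return []
--     starts = [1] + [i for i, line in enumerate(lines, start=1)
--                     if i >= 2 and line.strip().startswith("#")]
--     result: list[tuple[str, int, int]] = []
--     for k, start in enumerate(starts):
--         end = starts[k + 1] - 1 if k + 1 < len(starts) else len(lines)
--         body = "\n".join(lines[start - 1:end]).strip()
--         if body:
--             result.append((body, start, end))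
--     return result
-- ===== Notes on version B (the rewrite author's own statement) =====
-- stated objective: alternative
-- what changed: Replaces A's single stateful accumulator loop (buffer/start_line carried across iterations, flushed at each header and at EOF) by two independent passes: first collect the section start indices (line 1 plus every header line at index >= 2), then slice and join each consecutive segment and filter empty bodies.
import Mathlib
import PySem

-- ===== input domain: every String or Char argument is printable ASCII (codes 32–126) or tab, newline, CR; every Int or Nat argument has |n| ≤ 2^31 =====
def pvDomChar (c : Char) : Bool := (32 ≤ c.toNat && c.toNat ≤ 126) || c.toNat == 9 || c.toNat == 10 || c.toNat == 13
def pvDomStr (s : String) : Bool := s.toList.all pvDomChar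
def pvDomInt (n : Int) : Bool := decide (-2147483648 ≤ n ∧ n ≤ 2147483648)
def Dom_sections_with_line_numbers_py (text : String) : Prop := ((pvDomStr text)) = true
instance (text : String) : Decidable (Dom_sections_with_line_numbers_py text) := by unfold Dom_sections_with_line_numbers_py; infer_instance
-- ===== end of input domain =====

-- B replaces A's single accumulator loop by two independent passes (collect section start indices, then slice/join each segment); objective: simpler decomposition, not faster.

-- ===== PORT A =====
-- loop body of A's for-loop, as a named helper (state = (sections, buffer, start_line))
def stepA (st : List (String × Int × Int) × List String × Int) (il : Int × String) :
    List (String × Int × Int) × List String × Int :=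
  if PySem.Str.startswith (PySem.Str.strip il.2) "#" && !st.2.1.isEmpty then
    (st.1 ++ [(PySem.Str.strip (PySem.Str.join "\n" st.2.1), st.2.2, il.1 - 1)], [il.2], il.1)
  else
    (st.1, st.2.1 ++ [il.2], if st.2.1.isEmpty then il.1 else st.2.2)

def sections_with_line_numbers_py (text : String) : List (String × Int × Int) :=
  let lines := PySem.Str.splitlines text
  let st := (PySem.List.enumerate lines 1).foldl stepA ([], [], 1)
  let sections :=
    if !st.2.1.isEmpty then
      st.1 ++ [(PySem.Str.strip (PySem.Str.join "\n" st.2.1), st.2.2, (lines.length : Int))]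
    else st.1
  sections.filter (fun t => decide (t.1 ≠ ""))

-- ===== PORT B =====
-- B's second pass: walk the start indices, slicing each [start-1 : next start - 1] (last: to n)
def altSegLoop (lines : List String) (n : Int) : List Int → List (String × Int × Int)
  | [] => []
  | [s] =>
    let body := PySem.Str.strip (PySem.Str.join "\n" (PySem.List.slice lines (some (s - 1)) (some n)))
    if body ≠ "" then [(body, s, n)] else []
  | s :: s' :: rest =>
    let e := s' - 1
    let body := PySem.Str.strip (PySem.Str.join "\n" (PySem.List.slice lines (some (s - 1)) (some e)))
    (if body ≠ "" then [(body, s, e)] else []) ++ altSegLoop lines n (s' :: rest)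

def sections_with_line_numbers_py_alt (text : String) : List (String × Int × Int) :=
  let lines := PySem.Str.splitlines text
  if lines.isEmpty then []
  else
    let starts := 1 :: ((PySem.List.enumerate lines 1).filter
      (fun il => decide (2 ≤ il.1) && PySem.Str.startswith (PySem.Str.strip il.2) "#")).map Prod.fst
    altSegLoop lines (lines.length : Int) starts

-- ===== PRECONDITION & SPEC =====
def Spec_sections_with_line_numbers_py (text : String) (out : List (String × Int × Int)) : Prop := out = sections_with_line_numbers_py_alt text
instance (text : String) (out : List (String × Int × Int)) : Decidable (Spec_sections_with_line_numbers_py text out) := by unfold Spec_sections_with_line_numbers_py; infer_instance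

-- ===== CLAIM (what is proved, stated in full; the proofs are below) =====
def Claim_equal_sections_with_line_numbers_py : Prop := ∀ (text : String), Dom_sections_with_line_numbers_py text → Spec_sections_with_line_numbers_py text (sections_with_line_numbers_py text)

-- ===== LEMMAS AND PROOFS =====

-- header start indices of the tail, as B's first pass computes them
def hdrIdx (i : Int) (xs : List String) : List Int :=
  ((PySem.List.enumerate xs i).filter
    (fun il => decide (2 ≤ il.1) && PySem.Str.startswith (PySem.Str.strip il.2) "#")).map Prod.fst

-- A's final flush followed by the empty-body filter, as one helper
def flushFilter (lines : List String) (st : List (String × Int × Int) × List String × Int) :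
    List (String × Int × Int) :=
  List.filter (fun t => decide (t.1 ≠ ""))
    (if !st.2.1.isEmpty then
        st.1 ++ [(PySem.Str.strip (PySem.Str.join "\n" st.2.1), st.2.2, (lines.length : Int))]
      else st.1)

lemma hdrIdx_nil (i : Int) : hdrIdx i [] = [] := by
  simp [hdrIdx, PySem.List.enumerate_nil]

lemma hdrIdx_cons_pos (i : Int) (l : String) (xs : List String) (h1 : 2 ≤ i)
    (h2 : PySem.Str.startswith (PySem.Str.strip l) "#" = true) :
    hdrIdx i (l :: xs) = i :: hdrIdx (i + 1) xs := by
  have hd : decide ((2:Int) ≤ i) = true := decide_eq_true h1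
  simp only [hdrIdx, PySem.List.enumerate_cons, List.filter_cons, h2, hd, Bool.and_true,
    if_true, List.map_cons]

lemma hdrIdx_cons_neg (i : Int) (l : String) (xs : List String)
    (h2 : PySem.Str.startswith (PySem.Str.strip l) "#" = false) :
    hdrIdx i (l :: xs) = hdrIdx (i + 1) xs := by
  simp only [hdrIdx, PySem.List.enumerate_cons, List.filter_cons, h2, Bool.and_false,
    Bool.false_eq_true, if_false]

lemma foldl_stepA_append (xs : List (Int × String)) :
    ∀ (secs : List (String × Int × Int)) (buf : List String) (sl : Int),
    List.foldl stepA (secs, buf, sl) xs =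
      (secs ++ (List.foldl stepA ([], buf, sl) xs).1, (List.foldl stepA ([], buf, sl) xs).2) := by
  induction xs with
  | nil => intro secs buf sl; simp
  | cons x xs ih =>
    intro secs buf sl
    by_cases h : (PySem.Str.startswith (PySem.Str.strip x.2) "#" && !buf.isEmpty) = true
    · simp only [List.foldl_cons, stepA, if_pos h, List.nil_append]
      rw [ih (secs ++ [(PySem.Str.strip (PySem.Str.join "\n" buf), sl, x.1 - 1)]),
          ih [(PySem.Str.strip (PySem.Str.join "\n" buf), sl, x.1 - 1)]]
      simp
    · simp only [List.foldl_cons, stepA, if_neg h]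
      exact ih secs (buf ++ [x.2]) _

lemma flushFilter_append (lines : List String) (secs₀ secs : List (String × Int × Int))
    (r2 : List String × Int) :
    flushFilter lines (secs₀ ++ secs, r2) =
      List.filter (fun t => decide (t.1 ≠ "")) secs₀ ++ flushFilter lines (secs, r2) := by
  obtain ⟨buf, sl⟩ := r2
  by_cases h : buf.isEmpty <;> simp [flushFilter, h, List.filter_append, List.append_assoc]

lemma slice_mid (pre buf rest : List String) :
    PySem.List.slice (pre ++ buf ++ rest) (some ((pre.length : Int)))
        (some ((pre.length : Int) + (buf.length : Int))) = buf := by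
  rw [show ((pre.length : Int) + (buf.length : Int)) = ((pre.length + buf.length : Nat) : Int) by push_cast; ring,
      PySem.List.slice_natCast, List.append_assoc, List.drop_left]
  simp

lemma altSegLoop_singleton (lines : List String) (n s : Int) :
    altSegLoop lines n [s] =
      (if PySem.Str.strip (PySem.Str.join "\n" (PySem.List.slice lines (some (s - 1)) (some n))) ≠ "" then
        [(PySem.Str.strip (PySem.Str.join "\n" (PySem.List.slice lines (some (s - 1)) (some n))), s, n)]
      else []) := rfl

lemma altSegLoop_cons_cons (lines : List String) (n s s' : Int) (t : List Int) :
    altSegLoop lines n (s :: s' :: t) =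
      (if PySem.Str.strip (PySem.Str.join "\n" (PySem.List.slice lines (some (s - 1)) (some (s' - 1)))) ≠ "" then
        [(PySem.Str.strip (PySem.Str.join "\n" (PySem.List.slice lines (some (s - 1)) (some (s' - 1)))), s, s' - 1)]
      else []) ++ altSegLoop lines n (s' :: t) := rfl

lemma filter_single (x : String × Int × Int) :
    List.filter (fun t => decide (t.1 ≠ "")) [x] = if x.1 ≠ "" then [x] else [] := by
  by_cases h : x.1 = "" <;> simp [h, List.filter]

lemma main_loop (rest : List String) : ∀ (pre buf : List String), buf ≠ [] →
    flushFilter (pre ++ buf ++ rest)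
      (List.foldl stepA ([], buf, (pre.length : Int) + 1)
        (PySem.List.enumerate rest ((pre.length : Int) + (buf.length : Int) + 1)))
    = altSegLoop (pre ++ buf ++ rest) (((pre ++ buf ++ rest).length : Int))
        (((pre.length : Int) + 1) :: hdrIdx ((pre.length : Int) + (buf.length : Int) + 1) rest) := by
  induction rest with
  | nil =>
    intro pre buf hbuf
    have hbe : buf.isEmpty = false := by simpa using hbuf
    have hsl := slice_mid pre buf []
    rw [hdrIdx_nil]
    simp only [PySem.List.enumerate_nil, List.foldl_nil, flushFilter, hbe, Bool.not_false,
      if_true, List.nil_append, altSegLoop_singleton]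
    rw [show ((pre.length : Int) + 1 - 1) = (pre.length : Int) by ring,
        show (((pre ++ buf ++ ([] : List String)).length : Int))
          = (pre.length : Int) + (buf.length : Int) by simp]
    rw [hsl]
    by_cases hb : PySem.Str.strip (PySem.Str.join "\n" buf) = "" <;> simp [hb]
  | cons l rest' ih =>
    intro pre buf hbuf
    have hbe : buf.isEmpty = false := by simpa using hbuf
    have hb1 : 1 ≤ buf.length := List.length_pos_of_ne_nil hbuf
    rw [PySem.List.enumerate_cons, List.foldl_cons]
    cases hB : PySem.Str.startswith (PySem.Str.strip l) "#" with
    | true =>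
      -- header line: A flushes its buffer, B starts a new segment at this index
      have hstep : stepA ([], buf, (pre.length : Int) + 1)
            ((pre.length : Int) + (buf.length : Int) + 1, l) =
          ([(PySem.Str.strip (PySem.Str.join "\n" buf), (pre.length : Int) + 1,
              (pre.length : Int) + (buf.length : Int) + 1 - 1)], [l],
            (pre.length : Int) + (buf.length : Int) + 1) := by
        have hB2 : PySem.Chars.startswith (PySem.Chars.strip l.toList) ['#'] = true := by
          have h := hB
          simp only [pysem] at h ⊢
          rw [show "#".toList = ['#'] from rfl] at h
          simpa using h
        simp [stepA, hbe, hB2]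
      rw [hstep, foldl_stepA_append, flushFilter_append, Prod.mk.eta,
          hdrIdx_cons_pos _ _ _ (by omega) hB]
      rw [altSegLoop_cons_cons]
      have hsl : PySem.List.slice (pre ++ buf ++ l :: rest')
          (some ((pre.length : Int) + 1 - 1))
          (some ((pre.length : Int) + (buf.length : Int) + 1 - 1)) = buf := by
        rw [show ((pre.length : Int) + 1 - 1) = (pre.length : Int) by ring,
            show ((pre.length : Int) + (buf.length : Int) + 1 - 1)
              = (pre.length : Int) + (buf.length : Int) by ring]
        exact slice_mid pre buf (l :: rest')
      rw [hsl, filter_single]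
      have ih' := ih (pre ++ buf) [l] (by simp)
      simp only [List.append_assoc, List.singleton_append, List.length_append, List.length_cons,
        List.length_nil] at ih' ⊢
      push_cast at ih' ⊢
      ring_nf at ih' ⊢
      rw [ih']
    | false =>
      -- ordinary line: A appends to its buffer, B's first pass skips the index
      have hstep : stepA ([], buf, (pre.length : Int) + 1)
            ((pre.length : Int) + (buf.length : Int) + 1, l) =
          ([], buf ++ [l], (pre.length : Int) + 1) := by
        have hB2 : PySem.Chars.startswith (PySem.Chars.strip l.toList) ['#'] = false := by
          have h := hB
          simp only [pysem] at h ⊢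
          rw [show "#".toList = ['#'] from rfl] at h
          simpa using h
        simp [stepA, hbe, hB2]
      rw [hstep, hdrIdx_cons_neg _ _ _ hB]
      have ih' := ih pre (buf ++ [l]) (by simp)
      simp only [List.append_assoc, List.singleton_append, List.length_append, List.length_cons,
        List.length_nil] at ih' ⊢
      push_cast at ih' ⊢
      ring_nf at ih' ⊢
      exact ih'

theorem sections_with_line_numbers_py_spec : Claim_equal_sections_with_line_numbers_py := by
  intro text _
  unfold Spec_sections_with_line_numbers_py
  unfold sections_with_line_numbers_py sections_with_line_numbers_py_alt
  cases hls : PySem.Str.splitlines text with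
  | nil => simp
  | cons l ls =>
    have hA : List.foldl stepA ([], [], 1) (PySem.List.enumerate (l :: ls) 1)
        = List.foldl stepA ([], [l], 1) (PySem.List.enumerate ls 2) := by
      rw [PySem.List.enumerate_cons, List.foldl_cons]
      norm_num [stepA]
    have hmain := main_loop ls [] [l] (by simp)
    simp only [List.length_nil, List.nil_append, List.singleton_append, List.length_cons,
      Nat.cast_zero, zero_add] at hmain
    norm_num at hmain
    have hstarts : (1 : Int) :: ((PySem.List.enumerate (l :: ls) 1).filter
        (fun il => decide (2 ≤ il.1) && PySem.Str.startswith (PySem.Str.strip il.2) "#")).map Prod.fst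
        = 1 :: hdrIdx 2 ls := by
      rw [PySem.List.enumerate_cons, List.filter_cons]
      norm_num [hdrIdx]
    simp only [List.isEmpty_cons, hA, hstarts, if_false, Bool.false_eq_true]
    -- reduce A's flush expression to flushFilter and close with hmain
    show flushFilter (l :: ls) (List.foldl stepA ([], [l], 1) (PySem.List.enumerate ls 2))
        = altSegLoop (l :: ls) ((l :: ls).length : Int) (1 :: hdrIdx 2 ls)
    exact hmain
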